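-- pv_equiv track=rewrite | github.com/Kronestones/Medusa | medusa/scanner.py | _extract_state_from_court
-- ===== SOURCE A (Python) =====
-- def _extract_state_from_court(court_id):
--     # CourtListener court IDs often contain state abbreviations
--     # e.g. "ca9", "nyed", "txsd"
--     state_map = {
--         "ca": "CA", "ny": "NY", "tx": "TX", "fl": "FL", "il": "IL",
--         "pa": "PA", "oh": "OH", "ga": "GA", "nc": "NC", "mi": "MI",
--         "wa": "WA", "az": "AZ", "ma": "MA", "co": "CO", "md": "MD",
--         "mn": "MN", "wi": "WI", "mo": "MO", "la": "LA", "al": "AL",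
--         "sc": "SC", "ky": "KY", "or": "OR", "ok": "OK", "ct": "CT",
--         "ia": "IA", "ut": "UT", "nv": "NV", "ar": "AR", "ms": "MS",
--         "ks": "KS", "ne": "NE", "nm": "NM", "wv": "WV", "id": "ID",
--         "hi": "HI", "nh": "NH", "me": "ME", "ri": "RI", "mt": "MT",
--         "de": "DE", "sd": "SD", "nd": "ND", "ak": "AK", "vt": "VT",
--         "wy": "WY", "dc": "DC",
--     }
--     cid = (court_id or "").lower()
--     for abbr, state in state_map.items():
--         if cid.startswith(abbr):
--             return state
--     return None
-- ===== SOURCE B (Python) =====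
-- # B: every map value is just the key uppercased and every key has length 2,
-- # so instead of a key->value dict scanned with startswith we keep only a SET
-- # of the 47 two-letter abbreviations, test the lowercased 2-char prefix for
-- # membership, and uppercase it ourselves.
-- _STATES = frozenset((
--     "ca ny tx fl il pa oh ga nc mi wa az ma co md mn wi mo la al "
--     "sc ky or ok ct ia ut nv ar ms ks ne nm wv id hi nh me ri mt "
--     "de sd nd ak vt wy dc").split())
--
-- def _extract_state_from_court(court_id):
--     key = (court_id or "")[:2].lower()
--     return key.upper() if key in _STATES else None
-- ===== Notes on version B (the rewrite author's own statement) =====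
-- stated objective: simpler
-- what changed: Replaced the key->value dict and the 47-entry startswith scan by a set of two-letter abbreviations: B tests the lowercased two-character prefix for set membership and upper-cases it itself, exploiting that every value in A's map is exactly its key upper-cased.
import Mathlib
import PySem

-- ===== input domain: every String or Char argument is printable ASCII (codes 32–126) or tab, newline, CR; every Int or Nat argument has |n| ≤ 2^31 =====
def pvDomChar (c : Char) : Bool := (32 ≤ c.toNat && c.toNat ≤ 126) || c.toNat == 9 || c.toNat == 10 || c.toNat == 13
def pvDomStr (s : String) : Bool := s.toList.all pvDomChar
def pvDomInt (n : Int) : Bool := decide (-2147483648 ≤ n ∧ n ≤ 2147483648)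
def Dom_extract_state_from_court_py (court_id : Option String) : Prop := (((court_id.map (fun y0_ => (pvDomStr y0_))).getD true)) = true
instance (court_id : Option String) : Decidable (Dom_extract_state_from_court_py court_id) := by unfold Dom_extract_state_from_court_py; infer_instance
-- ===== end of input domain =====

-- B drops the key->value dict and the startswith scan: it keeps only a SET of the
-- 47 two-letter abbreviations, tests the lowercased 2-char prefix for membership
-- and upper-cases it itself (every map value in A is its key upper-cased): simpler.

-- ===== PORT A =====
-- the state_map dict literal, as the ordered pair list A's loop iterates over
def pvStateMapA : List (String × String) := [
  ("ca", "CA"), ("ny", "NY"), ("tx", "TX"), ("fl", "FL"), ("il", "IL"),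
  ("pa", "PA"), ("oh", "OH"), ("ga", "GA"), ("nc", "NC"), ("mi", "MI"),
  ("wa", "WA"), ("az", "AZ"), ("ma", "MA"), ("co", "CO"), ("md", "MD"),
  ("mn", "MN"), ("wi", "WI"), ("mo", "MO"), ("la", "LA"), ("al", "AL"),
  ("sc", "SC"), ("ky", "KY"), ("or", "OR"), ("ok", "OK"), ("ct", "CT"),
  ("ia", "IA"), ("ut", "UT"), ("nv", "NV"), ("ar", "AR"), ("ms", "MS"),
  ("ks", "KS"), ("ne", "NE"), ("nm", "NM"), ("wv", "WV"), ("id", "ID"),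
  ("hi", "HI"), ("nh", "NH"), ("me", "ME"), ("ri", "RI"), ("mt", "MT"),
  ("de", "DE"), ("sd", "SD"), ("nd", "ND"), ("ak", "AK"), ("vt", "VT"),
  ("wy", "WY"), ("dc", "DC")
]

-- the 'for abbr, state in state_map.items(): if cid.startswith(abbr): return state' loop
def pvLoopA : List (String × String) → String → Option String
  | [], _ => none
  | (abbr, state) :: rest, cid =>
      if PySem.Str.startswith cid abbr then some state else pvLoopA rest cid

def extract_state_from_court_py (court_id : Option String) : Option String :=
  let cid := PySem.Str.lower (match court_id with | none => "" | some s => s)  -- (court_id or "").lower()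
  pvLoopA pvStateMapA cid

-- ===== PORT B =====
-- _STATES = frozenset("ca ny … dc".split()) — the set of 47 abbreviations
def pvStatesB : PySem.Set String := PySem.Set.ofList (PySem.Str.split₀
  ("ca ny tx fl il pa oh ga nc mi wa az ma co md mn wi mo la al " ++
   "sc ky or ok ct ia ut nv ar ms ks ne nm wv id hi nh me ri mt " ++
   "de sd nd ak vt wy dc"))

def extract_state_from_court_py_alt (court_id : Option String) : Option String :=
  -- key = (court_id or "")[:2].lower()
  let key := PySem.Str.lower
    (PySem.Str.slice (match court_id with | none => "" | some s => s) none (some 2))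
  -- key.upper() if key in _STATES else None
  if key ∈ pvStatesB then some (PySem.Str.upper key) else none

-- ===== PRECONDITION & SPEC =====
def Spec_extract_state_from_court_py (court_id : Option String) (out : Option String) : Prop := out = extract_state_from_court_py_alt court_id
instance (court_id : Option String) (out : Option String) : Decidable (Spec_extract_state_from_court_py court_id out) := by unfold Spec_extract_state_from_court_py; infer_instance

-- ===== CLAIM (what is proved, stated in full; the proofs are below) =====
def Claim_equal_extract_state_from_court_py : Prop := ∀ (court_id : Option String), Dom_extract_state_from_court_py court_id → Spec_extract_state_from_court_py court_id (extract_state_from_court_py court_id)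

-- ===== LEMMAS AND PROOFS =====

-- lowercasing commutes with taking the first two characters (lower is char-wise)
theorem pv_lower_slice2 (s : String) :
    PySem.Str.lower (PySem.Str.slice s none (some 2)) =
      PySem.Str.slice (PySem.Str.lower s) none (some 2) := by
  apply String.toList_injective
  rw [PySem.Str.toList_lower]
  simp only [PySem.Str.toList_slice, PySem.Chars.slice_eq_listSlice,
    PySem.List.slice_to s.toList (by norm_num : (0:Int) ≤ 2),
    PySem.Str.toList_lower]
  simp only [PySem.Chars.lower]
  rw [PySem.List.slice_to _ (by norm_num : (0:Int) ≤ 2)]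
  simp [List.map_take]

-- for a pattern of length 2, startswith is an equality test on the 2-char prefix slice
theorem pv_startswith_len2 (cid p : String) (hp : p.toList.length = 2) :
    PySem.Str.startswith cid p = (p == PySem.Str.slice cid none (some 2)) := by
  have hs : (PySem.Str.slice cid none (some 2)).toList = cid.toList.take 2 := by
    simp [PySem.Str.toList_slice, PySem.Chars.slice_eq_listSlice]
    have := PySem.List.slice_to_natCast (xs := cid.toList) (b := 2)
    simpa using this
  have key : PySem.Str.startswith cid p = true ↔ p = PySem.Str.slice cid none (some 2) := by
    rw [PySem.Str.startswith_eq, PySem.Chars.startswith_iff]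
    rw [List.prefix_iff_eq_take, hp, ← hs]
    constructor
    · intro h; exact String.toList_injective h
    · intro h; rw [h]
  rw [Bool.eq_iff_iff, key, beq_iff_eq]

-- A's first-match scan over a list whose keys all have length 2 and whose values
-- are the upper-cased keys equals B's membership-test-then-uppercase, keyed by
-- the 2-char prefix of the (lowered) string.
theorem pv_loop_eq_member (cid : String) :
    ∀ (l : List (String × String)),
      (∀ p ∈ l, p.1.toList.length = 2 ∧ p.2 = PySem.Str.upper p.1) →
      pvLoopA l cid =
        (if PySem.Str.slice cid none (some 2) ∈ l.map Prod.fst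
         then some (PySem.Str.upper (PySem.Str.slice cid none (some 2))) else none) := by
  intro l
  induction l with
  | nil => intro _; simp [pvLoopA]
  | cons hd tl ih =>
      intro h
      obtain ⟨k, v⟩ := hd
      obtain ⟨hk2, hkv⟩ := h (k, v) (by simp)
      simp only [pvLoopA]
      rw [pv_startswith_len2 cid k hk2]
      by_cases hk : k = PySem.Str.slice cid none (some 2)
      · subst hk; simp only [beq_self_eq_true, if_true, List.map_cons, List.mem_cons,
          true_or]
        exact congrArg some hkv
      · have hb : (k == PySem.Str.slice cid none (some 2)) = false := by
          simpa using hk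
        rw [hb]
        rw [if_neg (by simp), ih (fun p hp => h p (by simp [hp]))]
        by_cases hmem : PySem.Str.slice cid none (some 2) ∈ List.map Prod.fst tl
        · rw [if_pos hmem, if_pos (by simp only [List.map_cons, List.mem_cons]; exact Or.inr hmem)]
        · rw [if_neg hmem, if_neg (by
            simp only [List.map_cons, List.mem_cons]
            rintro (h' | h')
            · exact hk h'.symm
            · exact hmem h')]

-- B's set is exactly the key list of A's map (keys are distinct, split₀ evaluates)
set_option maxRecDepth 8000 in
theorem pv_statesB_eq : pvStatesB = pvStateMapA.map Prod.fst := by decide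

-- A's map has 2-char keys and values = upper-cased keys
set_option maxRecDepth 8000 in
theorem pv_mapA_shape :
    ∀ p ∈ pvStateMapA, p.1.toList.length = 2 ∧ p.2 = PySem.Str.upper p.1 := by decide

-- ===== VERDICT (by name: the statement is the Claim_ definition above) =====
theorem extract_state_from_court_py_spec : Claim_equal_extract_state_from_court_py := by
  intro court_id _
  unfold Spec_extract_state_from_court_py extract_state_from_court_py extract_state_from_court_py_alt
  rw [pv_loop_eq_member _ pvStateMapA pv_mapA_shape, pv_statesB_eq, pv_lower_slice2]
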